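/- GENERATED by tools/from_farm_form.py from prooffarm-gif/accepted/digest_file.6/Lemmas.lean (a worked proof of the farm's unit `digest_file.6`,
   accepted by the verdict) — do not edit. -/
import Gif.Spec.Units.digest_file_6
import Gif.Spec.AllSegs

/-!
  The lemmas of unit `digest_file.6` (10594BH … 1059AFH, gif_driver.c:167-170 and the `k++` of l.158).
  PURE PART (§1): what one round takes from the state invariant (`seg6_arr_where`, `seg6_img`), the invariant behind a footprint
  below the slot of `pixels` (`seg6_ok_step`), a field of the heap through such a footprint (`seg6_rd_step`), and `Round` carried
  from one state of the round to a later one (`seg6_round_carry`).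
  MACHINE PART (§2): one lemma per returned callee state: `Round` at the cut to `Round` at the return address of `digest_map`
  (`seg6_stageA`), of `digest_bytes` (`seg6_stageB`), of `digest_extensions` (`seg6_stageC`), and the last three instructions back
  to the head (`seg6_stageD`).
-/

open X86 X86.User Asan ProgX.Base ProgX.Base.Spec Gif.Spec

set_option maxRecDepth 4000
set_option maxHeartbeats 4000000

namespace Gif.Spec.digest_file_6

/-! ### 1. The pure part -/

/-- **Where the SavedImages array is**, as numbers: in the heap's region, above the stack (`Owns.inside` without its `% 16`
clause, which must not reach `omega`). -/
theorem seg6_arr_where {H : Heap} {F : Forest} {R : Rd} {mem mem' : Mem} (h : GifOK H F R mem) (hok : HeapOK H mem')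
    (hbase : H.base = 0x800000) {s : Saved} (hs : F.saved = some s) :
    0x800040 ≤ s.arr ∧ s.arr + 56 * s.cap + 32 ≤ 0xC00000 := by
  have h1 : Owns H (Saved.objs F.saved) := (h.owns.perm (Forest.owned_saved F)).sublist (List.sublist_append_left _ _)
  rw [hs, Saved.objs_some] at h1
  have hin := h1.inside hok (o := (s.arr, 56 * s.cap)) List.mem_cons_self
  simp only at hin
  rw [hbase] at hin
  have k1 := hin.1
  have k2 := hin.2.2.2.2
  omega

/-- **The counted slot `k` of the array `s` agrees with the image `s.imgs[k]`** in any memory with the state invariant (what a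
callee's precondition takes at the callee's entry, `seg6_ok_step` giving the invariant there). -/
theorem seg6_imgAt {H : Heap} {F : Forest} {R : Rd} {mem : Mem} (h : GifOK H F R mem) {s : Saved} (hs : F.saved = some s)
    {k : Nat} (hk : k < s.imgs.length) : ImgAt (s.arr + 56 * k) s.imgs[k] mem := by
  have hsh := h.shape.saved
  unfold SavedAt at hsh
  rw [hs] at hsh
  exact hsh.2.2.2.2 k hk

/-- **The counted image `k` of the array `s`**: its colour map, raster (there is one: `F.Complete`) and extension list are
owned; the slot lies inside the array (`k < cap`), which is live with its exact size. -/
theorem seg6_img {H : Heap} {F : Forest} {R : Rd} {mem : Mem} (h : GifOK H F R mem) (hc : F.Complete) {s : Saved}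
    (hs : F.saved = some s) {k : Nat} (hk : k < s.imgs.length) :
    Owns H (Map.objs s.imgs[k].cm) ∧ (∃ r : Nat × Nat, s.imgs[k].raster = some r ∧ H.Live r.1 r.2) ∧
      Owns H (Exts.objs s.imgs[k].ext) ∧ k < s.cap ∧ H.Live s.arr (56 * s.cap) := by
  have hsh := h.shape.saved
  unfold SavedAt at hsh
  rw [hs] at hsh
  have hcap := hsh.2.2.1
  have hg : s.imgs[k] ∈ s.imgs := List.getElem_mem hk
  obtain ⟨ho1, ho2, ho3⟩ := digest_file.img_parts h hc hs hg
  exact ⟨ho1, ho2, ho3, by omega, digest_file.owns_arr h hs⟩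

/-- **The state invariant behind a footprint below the slot of `pixels`** (`[RA − 224, RA − 64)`: the clause `ok` of
`digest_file.At.carry`, for a memory that is not yet the memory of a cut: a callee's entry). -/
theorem seg6_ok_step {cut : Word} {H : Heap} {rest : List Obj} {frames : List (Nat × FrameLayout)} {F : Forest}
    {R : Rd} {u₀ e : State} {ret : Word} {v : State} {mem' : Mem} {lo hi : Nat}
    (hat : digest_file.At cut H rest frames F R u₀ e ret v)
    (hlo : (e.reg .rsp).toNat - 224 ≤ lo) (hhi : hi ≤ (e.reg .rsp).toNat - 64)
    (hsame : Mem.SameExcept [⟨lo, hi⟩] v.mem mem') :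
    GifOK H F R mem' := by
  have he_room := hat.entry.room
  have he_top := hat.entry.top
  simp only [vspec, ProgX.conv_stackLo, ProgX.conv_stackHi] at he_room he_top
  have henv := hat.pre.1
  have hcur := henv.ctx.cursor_range henv.heap.inv.shadow
  refine hat.ok.sameExcept hat.inv.heap ⟨hcur.1, hcur.2.1⟩ hsame ?_
  intro w hw
  have hw_eq := List.mem_singleton.mp hw
  rw [hw_eq]
  apply Loose.stack hat.inv.heap
  · simp only
    omega
  · simp only
    omega
  · simp only
    omega

/-- **A field of a heap object through a footprint inside the stack region**: the read at `a ≥ 800000H` is the old one. -/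
theorem seg6_rd_step {mem mem' : Mem} {lo hi : Nat} (hsame : Mem.SameExcept [⟨lo, hi⟩] mem mem') (hhi : hi ≤ 0x800000)
    (a n : Nat) (ha : 0x800000 ≤ a) (han : a + n ≤ 0xC00000) : rd mem' a n = rd mem a n := by
  unfold rd
  have e : (UInt64.ofNat a).toNat = a := toNat_ofNat_addr a (by omega)
  apply hsame.readLE _ n (by omega)
  intro w hw
  have hw_eq := List.mem_singleton.mp hw
  rw [hw_eq, e]
  right
  simp only
  omega

/-- **`Round` FROM ONE STATE OF THE ROUND TO A LATER ONE**: the step stored only below the function's locals (`[RA − 224, RA − 88)`: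
the return addresses of its calls and the callees' frames) and not into the shadow; `rsp`, `r12` (gif), `r13` (k), `rbx` (sp),
`rbp` (n) are as they were. `At` by `digest_file.At.carry`; `ImageCount`'s slot lies above the window; the slot's `Width` and
`Height` are heap bytes. -/
theorem seg6_round_carry {cut cut' : Word} {m : Nat} {H : Heap} {rest : List Obj} {frames : List (Nat × FrameLayout)}
    {F : Forest} {R : Rd} {u₀ e : State} {ret : Word} {v s : State}
    (hr : digest_file.Round cut m H rest frames F R u₀ e ret v)
    (hrip : s.rip = cut') (hrsp : s.reg .rsp = e.reg .rsp - 88) (hr12 : s.reg .r12 = v.reg .r12)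
    (hr13 : s.reg .r13 = v.reg .r13) (hrbx : s.reg .rbx = v.reg .rbx) (hrbp : s.reg .rbp = v.reg .rbp)
    (hcode : (conv u₀).code.In s.mem) (habi : (conv u₀).inv s)
    (hun : ShadowUntouched v.mem s.mem)
    (hsame : Mem.SameExcept [⟨(e.reg .rsp).toNat - 224, (e.reg .rsp).toNat - 88⟩] v.mem s.mem) :
    digest_file.Round cut' m H rest frames F R u₀ e ret s := by
  obtain ⟨hat, h_count, h_lt, h_meas, h_sp, h_n⟩ := hr
  have he_room := hat.entry.room
  have he_top := hat.entry.top
  simp only [vspec, ProgX.conv_stackLo, ProgX.conv_stackHi] at he_room he_top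
  -- the window widened to the one of `At.carry`
  have hsame' : Mem.SameExcept [⟨(e.reg .rsp).toNat - 224, (e.reg .rsp).toNat - 64⟩] v.mem s.mem := by
    refine hsame.mono ?_
    intro w hw a ha1 ha2
    have hw_eq := List.mem_singleton.mp hw
    rw [hw_eq] at ha1 ha2
    refine ⟨_, List.mem_cons_self, ?_, ?_⟩
    · exact ha1
    · simp only at ha2 ⊢
      omega
  have hat' := hat.carry (cut' := cut') hrip hrsp hr12 hcode habi hun hsame'
  obtain ⟨sv, hsv, hsp⟩ := h_sp
  obtain ⟨wa1, wa2⟩ := seg6_arr_where hat.ok hat.inv.heap hat.pre.1.heap.base hsv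
  have hlen : F.imgs.length ≤ sv.cap := by
    have hsh := hat.ok.shape.saved
    unfold SavedAt at hsh
    rw [hsv] at hsh
    rw [Forest.imgs_some hsv]
    exact hsh.2.2.1
  refine ⟨hat', ?_, ?_, ?_, ⟨sv, hsv, ?_⟩, ?_⟩
  · -- `ImageCount` in its slot `[RA − 76, RA − 72)`: above the window
    refine slot_sameExcept hsame (e.reg .rsp) 76 4 _ (by omega) (by omega) h_count ?_
    intro w hw
    have hw_eq := List.mem_singleton.mp hw
    rw [hw_eq]
    right
    simp only
    omega
  · rw [hr13]
    exact h_lt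
  · rw [hr13]
    exact h_meas
  · rw [hrbx, hr13]
    exact hsp
  · -- the slot's `Width` and `Height`: heap bytes
    rw [hrbp, hrbx, h_n]
    simp only [gfield]
    rw [seg6_rd_step hsame (by omega) _ 4 (by omega) (by omega), seg6_rd_step hsame (by omega) _ 4 (by omega) (by omega)]

/-! ### 2. The machine part: one lemma per returned callee state -/

/-- **Stage A** (10594BH … 105960H, gif_driver.c:167): the checked 8-byte load of `sp->ImageDesc.ColorMap` (`sp + 24`: inside the
live array `(sv.arr, 56 · sv.cap)`, `k < cap`), `digest_map(h, it)`: its precondition at its entry from `HeapPre.at_call` (the pushed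
return address), `ImgAt.cm` of the entry's memory (`seg6_ok_step`, `seg6_imgAt`) and `seg6_img`. Behind the call `Round` again
(`seg6_round_carry`: the callee wrote below the locals only). -/
theorem seg6_stageA {Lay : Layout} (hLay : Lay.hi = 0x1000000) {μ : Microarch} (hμ : UserX.MicroOK μ) {u₀ : State}
    (hcode : HasCodeNat Lay u₀ Gif.L.digest_file.entry Gif.Code.code_digest_file.nat Gif.L.digest_file.size)
    (h_digest_map : ∀ (H : Heap) (rest : List Obj) (frames : List (Nat × FrameLayout)) (m : Option Map),
      Calls Lay μ ProgX.Base.WayInv (ProgX.Base.conv u₀) Gif.L.digest_map.entry (Gif.Spec.digest_map.spec H rest frames m))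
    (h_load8 : Asan.SmallCheck Lay μ ProgX.Base.WayInv (ProgX.Base.CodeOK u₀) [.rax, .rcx, .rdx] 8
      ProgX.Base.L.__asan_load8_noabort.entry)
    {H : Heap} {rest : List Obj} {frames : List (Nat × FrameLayout)} {F : Forest} {R : Rd} {e : State} {ret : Word} {m : Nat}
    {v : State}
    (hr : digest_file.Round Gif.L.digest_file.at_10594b m H rest frames F R u₀ e ret v) :
    ReachVia Lay μ WayInv v (digest_file.Round Gif.L.digest_file.ret27 m H rest frames F R u₀ e ret) := by
  have hr0 := hr
  obtain ⟨hat, h_count, h_lt, h_meas, h_sp, h_n⟩ := hr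
  have he := hat.entry
  v_entry he
  obtain ⟨henv, hcomp, hrdi, hpix, hpix1, hpix2⟩ := hat.pre
  have hbase := henv.heap.base
  obtain ⟨sv, hsv, hsp⟩ := h_sp
  obtain ⟨wa1, wa2⟩ := seg6_arr_where hat.ok hat.inv.heap hbase hsv
  have hk' : (v.reg .r13).toNat < sv.imgs.length := by
    rw [← Forest.imgs_some hsv]
    exact h_lt
  obtain ⟨hocm, ⟨r, hras, hlr⟩, hoext, hkcap, hlarr⟩ := seg6_img hat.ok hcomp hsv hk'
  have himg := seg6_imgAt hat.ok hsv hk'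
  obtain ⟨g, h_g⟩ : ∃ g, sv.imgs[(v.reg .r13).toNat] = g := ⟨_, rfl⟩
  rw [h_g] at hocm hras hoext himg
  have hla : LiveIn (H.liveObjs ++ rest) frames sv.arr (56 * sv.cap) := hlarr.liveIn rest frames (Nat.le_refl _) (Nat.le_refl _)
  rw [← hsp] at himg
  obtain ⟨slot, h_slot⟩ : ∃ slot, (v.reg .rbx).toNat = slot := ⟨_, rfl⟩
  rw [h_slot] at hsp himg
  have c_rbx : v.reg .rbx = UInt64.ofNat slot := Word.eq_ofNat_of_toNat h_slot
  have ws1 : 0x800040 ≤ slot := by omega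
  have ws2 : slot + 56 + 32 ≤ 0xC00000 := by omega
  -- the present state, in the walker's names
  have w_rip := hat.rip
  have c_rsp : v.reg .rsp = e.reg .rsp - 88 := hat.rsp
  have w_eq : Mem.EqOn ProgX.Base.L.textLo ProgX.Base.L.textHi u₀.mem v.mem := ProgX.Base.conv_code_eqOn hat.code
  have hdf : v.flags .df = false := (show abiInv _ from hat.abi).1
  have hmx : v.mxcsr &&& 0x1F80 = 0x1F80 := (show abiInv _ from hat.abi).2
  have hsse := ProgX.Base.sseOK_of_abiInv hat.abi
  have w_kept : RegsKept [.rsp] v v := RegsKept.refl _ _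
  -- the load as a fact
  have hcm := himg.cm
  obtain ⟨cmv, h_cmv⟩ : ∃ x, SavedImage.ImageDesc.ColorMap v.mem slot = x := ⟨_, rfl⟩
  rw [h_cmv] at hcm
  have hcmlt : cmv < 2 ^ 64 := by
    rw [← h_cmv]
    simp only [gfield]
    exact rd_lt v.mem _ 8
  simp only [gfield] at h_cmv
  have l_cm : v.mem.readLE (UInt64.ofNat slot + 0x18) 8 = cmv := by
    rw [rd_eq_readLE v.mem _ (slot + 24) 8 (by u_omega)]
    exact h_cmv
  have hdm := h_digest_map H rest frames g.cm
  u_walk hcode [hμ.vendor]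
    until [Gif.L.digest_file.at_1059af]
    span [ProgX.Base.L.textLo, ProgX.Base.L.textHi] side (v_side)
  case check_10594f =>
    -- 0x10594f, gif_driver.c:167: the check of the load `sp->ImageDesc.ColorMap`: inside the array `(sv.arr, 56 · sv.cap)`
    have hun : ShadowUntouched v.mem s_10594f.mem := by v_untouched
    exact hla.accSmall hat.inv.shadow hun _ 8 (by decide) (by u_omega) (by u_omega)
  case call_inv =>
    v_inv
  case pre_10595b =>
    -- 0x10595b, gif_driver.c:167: digest_map's precondition over the pushed return address
    have hsame : Mem.SameExcept [⟨(e.reg .rsp).toNat - 96, (e.reg .rsp).toNat - 88⟩] v.mem s_10595b.mem := by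
      rw [w_mem]
      u_same
    refine ⟨?_, ?_, hocm⟩
    · refine HeapPre.at_call henv.heap (SameRegion.refl H) hat.inv hsame (by omega) ?_ ?_ ?_
      · rw [w_rsp]
        u_omega
      · rw [w_rsp]
        u_omega
      · rw [w_rsp]
        u_omega
    · rw [w_rsi, toNat_ofNat_addr cmv hcmlt]
      have hok' := seg6_ok_step hat (by omega) (by omega) hsame
      have himg' := seg6_imgAt hok' hsv hk'
      rw [h_g, ← hsp] at himg'
      have hcm' := himg'.cm
      simp only [gfield] at hcm'
      rw [seg6_rd_step hsame (by omega) _ 8 (by omega) (by omega), h_cmv] at hcm'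
      exact hcm'
  -- 0x105960: digest_map has returned
  v_after_call w_rsp_10595b w_mem_10595b
  have hsame1 : Mem.SameExcept [⟨(e.reg .rsp).toNat - 224, (e.reg .rsp).toNat - 88⟩] v.mem s_10595br.mem := by
    u_same
  have hun1 : ShadowUntouched v.mem s_10595br.mem := by
    v_untouched
  refine ReachVia.done ?_
  exact seg6_round_carry hr0 w_rip w_rsp (w_kept .r12 rfl) (w_kept .r13 rfl) (w_kept .rbx rfl) (w_kept .rbp rfl) w_code w_inv hun1 hsame1

/-- **Stage B** (105960H … 10597BH, gif_driver.c:168): `r14 = h`; the checked 8-byte load of `sp->RasterBits` (`sp + 32`),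
`digest_bytes(h, it, n)`: the image is complete, so `RasterAt` gives the pointer `r.1` and `n = rbp = r.2`, the live object
`(r.1, r.2)`. Behind the call `Round` again. -/
theorem seg6_stageB {Lay : Layout} (hLay : Lay.hi = 0x1000000) {μ : Microarch} (hμ : UserX.MicroOK μ) {u₀ : State}
    (hcode : HasCodeNat Lay u₀ Gif.L.digest_file.entry Gif.Code.code_digest_file.nat Gif.L.digest_file.size)
    (h_digest_bytes : ∀ (H : Heap) (rest : List Obj) (frames : List (Nat × FrameLayout)),
      Calls Lay μ ProgX.Base.WayInv (ProgX.Base.conv u₀) Gif.L.digest_bytes.entry (Gif.Spec.digest_bytes.spec H rest frames))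
    (h_load8 : Asan.SmallCheck Lay μ ProgX.Base.WayInv (ProgX.Base.CodeOK u₀) [.rax, .rcx, .rdx] 8
      ProgX.Base.L.__asan_load8_noabort.entry)
    {H : Heap} {rest : List Obj} {frames : List (Nat × FrameLayout)} {F : Forest} {R : Rd} {e : State} {ret : Word} {m : Nat}
    {v : State}
    (hr : digest_file.Round Gif.L.digest_file.ret27 m H rest frames F R u₀ e ret v) :
    ReachVia Lay μ WayInv v (digest_file.Round Gif.L.digest_file.ret29 m H rest frames F R u₀ e ret) := by
  have hr0 := hr
  obtain ⟨hat, h_count, h_lt, h_meas, h_sp, h_n⟩ := hr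
  have he := hat.entry
  v_entry he
  obtain ⟨henv, hcomp, hrdi, hpix, hpix1, hpix2⟩ := hat.pre
  have hbase := henv.heap.base
  obtain ⟨sv, hsv, hsp⟩ := h_sp
  obtain ⟨wa1, wa2⟩ := seg6_arr_where hat.ok hat.inv.heap hbase hsv
  have hk' : (v.reg .r13).toNat < sv.imgs.length := by
    rw [← Forest.imgs_some hsv]
    exact h_lt
  obtain ⟨hocm, ⟨r, hras, hlr⟩, hoext, hkcap, hlarr⟩ := seg6_img hat.ok hcomp hsv hk'
  have himg := seg6_imgAt hat.ok hsv hk'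
  obtain ⟨g, h_g⟩ : ∃ g, sv.imgs[(v.reg .r13).toNat] = g := ⟨_, rfl⟩
  rw [h_g] at hocm hras hoext himg
  have hla : LiveIn (H.liveObjs ++ rest) frames sv.arr (56 * sv.cap) := hlarr.liveIn rest frames (Nat.le_refl _) (Nat.le_refl _)
  rw [← hsp] at himg
  obtain ⟨slot, h_slot⟩ : ∃ slot, (v.reg .rbx).toNat = slot := ⟨_, rfl⟩
  rw [h_slot] at hsp himg
  have c_rbx : v.reg .rbx = UInt64.ofNat slot := Word.eq_ofNat_of_toNat h_slot
  have ws1 : 0x800040 ≤ slot := by omega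
  have ws2 : slot + 56 + 32 ≤ 0xC00000 := by omega
  -- the present state, in the walker's names
  have w_rip := hat.rip
  have c_rsp : v.reg .rsp = e.reg .rsp - 88 := hat.rsp
  have w_eq : Mem.EqOn ProgX.Base.L.textLo ProgX.Base.L.textHi u₀.mem v.mem := ProgX.Base.conv_code_eqOn hat.code
  have hdf : v.flags .df = false := (show abiInv _ from hat.abi).1
  have hmx : v.mxcsr &&& 0x1F80 = 0x1F80 := (show abiInv _ from hat.abi).2
  have hsse := ProgX.Base.sseOK_of_abiInv hat.abi
  have w_kept : RegsKept [.rsp] v v := RegsKept.refl _ _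
  -- the load as a fact: `sp->RasterBits = r.1`, and `n = rbp = r.2`
  have hra := himg.raster
  rw [hras] at hra
  unfold RasterAt at hra
  obtain ⟨hrb, hrn, -, -, hr31⟩ := hra
  rw [h_slot, ← hrn] at h_n
  have hr1lt : r.1 < 2 ^ 64 := by
    rw [← hrb]
    simp only [gfield]
    exact rd_lt v.mem _ 8
  simp only [gfield] at hrb
  have l_ras : v.mem.readLE (UInt64.ofNat slot + 0x20) 8 = r.1 := by
    rw [rd_eq_readLE v.mem _ (slot + 32) 8 (by u_omega)]
    exact hrb
  have hdb := h_digest_bytes H rest frames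
  u_walk hcode [hμ.vendor]
    until [Gif.L.digest_file.at_1059af]
    span [ProgX.Base.L.textLo, ProgX.Base.L.textHi] side (v_side)
  case check_105967 =>
    -- 0x105967, gif_driver.c:168: the check of the load `sp->RasterBits`: inside the array `(sv.arr, 56 · sv.cap)`
    have hun : ShadowUntouched v.mem s_105967.mem := by v_untouched
    exact hla.accSmall hat.inv.shadow hun _ 8 (by decide) (by u_omega) (by u_omega)
  case call_inv =>
    v_inv
  case pre_105976 =>
    -- 0x105976, gif_driver.c:168: digest_bytes's precondition over the pushed return address
    have hsame : Mem.SameExcept [⟨(e.reg .rsp).toNat - 96, (e.reg .rsp).toNat - 88⟩] v.mem s_105976.mem := by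
      rw [w_mem]
      u_same
    refine ⟨?_, Or.inr ?_⟩
    · refine HeapPre.at_call henv.heap (SameRegion.refl H) hat.inv hsame (by omega) ?_ ?_ ?_
      · rw [w_rsp]
        u_omega
      · rw [w_rsp]
        u_omega
      · rw [w_rsp]
        u_omega
    · rw [w_rsi, w_rdx, toNat_ofNat_addr r.1 hr1lt, h_n]
      exact hlr.liveIn rest frames (Nat.le_refl _) (Nat.le_refl _)
  -- 0x10597b: digest_bytes has returned
  v_after_call w_rsp_105976 w_mem_105976
  have hsame1 : Mem.SameExcept [⟨(e.reg .rsp).toNat - 224, (e.reg .rsp).toNat - 88⟩] v.mem s_105976r.mem := by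
    u_same
  have hun1 : ShadowUntouched v.mem s_105976r.mem := by
    v_untouched
  refine ReachVia.done ?_
  exact seg6_round_carry hr0 w_rip w_rsp (w_kept .r12 rfl) (w_kept .r13 rfl) (w_kept .rbx rfl) (w_kept .rbp rfl) w_code w_inv hun1 hsame1

/-- **Stage C** (10597BH … 1059A2H, gif_driver.c:169): `r15 = h`; the checked loads of `sp->ExtensionBlocks` (`sp + 48`, 8 bytes)
and `sp->ExtensionBlockCount` (`sp + 40`, 4 bytes, zero-extended into `esi`), `digest_extensions(h, count, blocks)`: `ImgAt.ext` of
its entry's memory, `Owns H (Exts.objs g.ext)`. Behind the call `Round` again. -/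
theorem seg6_stageC {Lay : Layout} (hLay : Lay.hi = 0x1000000) {μ : Microarch} (hμ : UserX.MicroOK μ) {u₀ : State}
    (hcode : HasCodeNat Lay u₀ Gif.L.digest_file.entry Gif.Code.code_digest_file.nat Gif.L.digest_file.size)
    (h_digest_extensions : ∀ (H : Heap) (rest : List Obj) (frames : List (Nat × FrameLayout)) (e : Option Exts),
      Calls Lay μ ProgX.Base.WayInv (ProgX.Base.conv u₀) Gif.L.digest_extensions.entry
        (Gif.Spec.digest_extensions.spec H rest frames e))
    (h_load8 : Asan.SmallCheck Lay μ ProgX.Base.WayInv (ProgX.Base.CodeOK u₀) [.rax, .rcx, .rdx] 8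
      ProgX.Base.L.__asan_load8_noabort.entry)
    (h_load4 : Asan.SmallCheck Lay μ ProgX.Base.WayInv (ProgX.Base.CodeOK u₀) [.rax, .rcx, .rdx] 4
      ProgX.Base.L.__asan_load4_noabort.entry)
    {H : Heap} {rest : List Obj} {frames : List (Nat × FrameLayout)} {F : Forest} {R : Rd} {e : State} {ret : Word} {m : Nat}
    {v : State}
    (hr : digest_file.Round Gif.L.digest_file.ret29 m H rest frames F R u₀ e ret v) :
    ReachVia Lay μ WayInv v (digest_file.Round Gif.L.digest_file.ret32 m H rest frames F R u₀ e ret) := by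
  have hr0 := hr
  obtain ⟨hat, h_count, h_lt, h_meas, h_sp, h_n⟩ := hr
  have he := hat.entry
  v_entry he
  obtain ⟨henv, hcomp, hrdi, hpix, hpix1, hpix2⟩ := hat.pre
  have hbase := henv.heap.base
  obtain ⟨sv, hsv, hsp⟩ := h_sp
  obtain ⟨wa1, wa2⟩ := seg6_arr_where hat.ok hat.inv.heap hbase hsv
  have hk' : (v.reg .r13).toNat < sv.imgs.length := by
    rw [← Forest.imgs_some hsv]
    exact h_lt
  obtain ⟨hocm, ⟨r, hras, hlr⟩, hoext, hkcap, hlarr⟩ := seg6_img hat.ok hcomp hsv hk'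
  have himg := seg6_imgAt hat.ok hsv hk'
  obtain ⟨g, h_g⟩ : ∃ g, sv.imgs[(v.reg .r13).toNat] = g := ⟨_, rfl⟩
  rw [h_g] at hocm hras hoext himg
  have hla : LiveIn (H.liveObjs ++ rest) frames sv.arr (56 * sv.cap) := hlarr.liveIn rest frames (Nat.le_refl _) (Nat.le_refl _)
  rw [← hsp] at himg
  obtain ⟨slot, h_slot⟩ : ∃ slot, (v.reg .rbx).toNat = slot := ⟨_, rfl⟩
  rw [h_slot] at hsp himg
  have c_rbx : v.reg .rbx = UInt64.ofNat slot := Word.eq_ofNat_of_toNat h_slot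
  have ws1 : 0x800040 ≤ slot := by omega
  have ws2 : slot + 56 + 32 ≤ 0xC00000 := by omega
  -- the present state, in the walker's names
  have w_rip := hat.rip
  have c_rsp : v.reg .rsp = e.reg .rsp - 88 := hat.rsp
  have w_eq : Mem.EqOn ProgX.Base.L.textLo ProgX.Base.L.textHi u₀.mem v.mem := ProgX.Base.conv_code_eqOn hat.code
  have hdf : v.flags .df = false := (show abiInv _ from hat.abi).1
  have hmx : v.mxcsr &&& 0x1F80 = 0x1F80 := (show abiInv _ from hat.abi).2
  have hsse := ProgX.Base.sseOK_of_abiInv hat.abi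
  have w_kept : RegsKept [.rsp] v v := RegsKept.refl _ _
  -- the loads as facts: `sp->ExtensionBlocks`, `sp->ExtensionBlockCount`
  obtain ⟨extv, h_extv⟩ : ∃ x, SavedImage.ExtensionBlocks v.mem slot = x := ⟨_, rfl⟩
  obtain ⟨cntv, h_cntv⟩ : ∃ x, SavedImage.ExtensionBlockCount v.mem slot = x := ⟨_, rfl⟩
  have hextlt : extv < 2 ^ 64 := by
    rw [← h_extv]
    simp only [gfield]
    exact rd_lt v.mem _ 8
  have hcntlt : cntv < 2 ^ 32 := by
    rw [← h_cntv]
    simp only [gfield]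
    exact rd_lt v.mem _ 4
  simp only [gfield] at h_extv h_cntv
  have l_ext : v.mem.readLE (UInt64.ofNat slot + 0x30) 8 = extv := by
    rw [rd_eq_readLE v.mem _ (slot + 48) 8 (by u_omega)]
    exact h_extv
  have l_cnt : v.mem.readLE (UInt64.ofNat slot + 0x28) 4 = cntv := by
    rw [rd_eq_readLE v.mem _ (slot + 40) 4 (by u_omega)]
    exact h_cntv
  have hde := h_digest_extensions H rest frames g.ext
  u_walk hcode [hμ.vendor]
    until [Gif.L.digest_file.at_1059af]
    span [ProgX.Base.L.textLo, ProgX.Base.L.textHi] side (v_side)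
  case check_105982 =>
    -- 0x105982, gif_driver.c:169: the check of the load `sp->ExtensionBlocks`: inside the array `(sv.arr, 56 · sv.cap)`
    have hun : ShadowUntouched v.mem s_105982.mem := by v_untouched
    exact hla.accSmall hat.inv.shadow hun _ 8 (by decide) (by u_omega) (by u_omega)
  case check_10598f =>
    -- 0x10598f, gif_driver.c:169: the check of the load `sp->ExtensionBlockCount`: inside the array
    have hun : ShadowUntouched v.mem s_10598f.mem := by v_untouched
    exact hla.accSmall hat.inv.shadow hun _ 4 (by decide) (by u_omega) (by u_omega)
  case call_inv =>
    v_inv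
  case pre_10599d =>
    -- 0x10599d, gif_driver.c:169: digest_extensions's precondition over the pushed return address
    have hsame : Mem.SameExcept [⟨(e.reg .rsp).toNat - 96, (e.reg .rsp).toNat - 88⟩] v.mem s_10599d.mem := by
      rw [w_mem]
      u_same
    refine ⟨?_, ?_, hoext⟩
    · refine HeapPre.at_call henv.heap (SameRegion.refl H) hat.inv hsame (by omega) ?_ ?_ ?_
      · rw [w_rsp]
        u_omega
      · rw [w_rsp]
        u_omega
      · rw [w_rsp]
        u_omega
    · have hok' := seg6_ok_step hat (by omega) (by omega) hsame
      have himg' := seg6_imgAt hok' hsv hk'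
      rw [h_g, ← hsp] at himg'
      have hex' := himg'.ext
      simp only [gfield] at hex'
      rw [seg6_rd_step hsame (by omega) _ 8 (by omega) (by omega), seg6_rd_step hsame (by omega) _ 4 (by omega) (by omega),
        h_extv, h_cntv] at hex'
      rw [w_rdx, w_rsi, toNat_ofNat_addr extv hextlt, toNat_ofBV_ofNat32 cntv hcntlt, Nat.mod_eq_of_lt hcntlt]
      exact hex'
  -- 0x1059a2: digest_extensions has returned
  v_after_call w_rsp_10599d w_mem_10599d
  have hsame1 : Mem.SameExcept [⟨(e.reg .rsp).toNat - 224, (e.reg .rsp).toNat - 88⟩] v.mem s_10599dr.mem := by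
    u_same
  have hun1 : ShadowUntouched v.mem s_10599dr.mem := by
    v_untouched
  refine ReachVia.done ?_
  exact seg6_round_carry hr0 w_rip w_rsp (w_kept .r12 rfl) (w_kept .r13 rfl) (w_kept .rbx rfl) (w_kept .rbp rfl) w_code w_inv hun1 hsame1

/-- **Stage D** (1059A2H … 1059AFH, gif_driver.c:169-170, 158): `[rsp] = h`, `total += n` (`[rsp+0x10]`), `k++`: back at the head
with the measure `m − 1`. The two stores lie in `[RA − 88, RA − 64)`: `At` by `digest_file.At.carry`; `ImageCount`'s slot
`[RA − 76, RA − 72)` lies between them (`u_frame`). -/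
theorem seg6_stageD {Lay : Layout} (hLay : Lay.hi = 0x1000000) {μ : Microarch} (hμ : UserX.MicroOK μ) {u₀ : State}
    (hcode : HasCodeNat Lay u₀ Gif.L.digest_file.entry Gif.Code.code_digest_file.nat Gif.L.digest_file.size)
    {H : Heap} {rest : List Obj} {frames : List (Nat × FrameLayout)} {F : Forest} {R : Rd} {e : State} {ret : Word} {m : Nat}
    {v : State}
    (hr : digest_file.Round Gif.L.digest_file.ret32 m H rest frames F R u₀ e ret v) :
    ReachVia Lay μ WayInv v (fun w => ∃ m' : Nat, m' < m ∧ digest_file.Head m' H rest frames F R u₀ e ret w) := by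
  obtain ⟨hat, h_count, h_lt, h_meas, h_sp, h_n⟩ := hr
  have he := hat.entry
  v_entry he
  obtain ⟨henv, hcomp, hrdi, hpix, hpix1, hpix2⟩ := hat.pre
  have hbase := henv.heap.base
  obtain ⟨sv, hsv, hsp⟩ := h_sp
  obtain ⟨wa1, wa2⟩ := seg6_arr_where hat.ok hat.inv.heap hbase hsv
  have hk' : (v.reg .r13).toNat < sv.imgs.length := by
    rw [← Forest.imgs_some hsv]
    exact h_lt
  obtain ⟨-, -, -, hkcap, -⟩ := seg6_img hat.ok hcomp hsv hk'
  -- the counter as a number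
  obtain ⟨k, h_k⟩ : ∃ k, (v.reg .r13).toNat = k := ⟨_, rfl⟩
  rw [h_k] at h_lt h_meas hkcap
  have c_r13 : v.reg .r13 = UInt64.ofNat k := Word.eq_ofNat_of_toNat h_k
  have hk32 : k + 1 < 2 ^ 32 := by omega
  -- the present state, in the walker's names
  have w_rip := hat.rip
  have c_rsp : v.reg .rsp = e.reg .rsp - 88 := hat.rsp
  have w_eq : Mem.EqOn ProgX.Base.L.textLo ProgX.Base.L.textHi u₀.mem v.mem := ProgX.Base.conv_code_eqOn hat.code
  have hdf : v.flags .df = false := (show abiInv _ from hat.abi).1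
  have hmx : v.mxcsr &&& 0x1F80 = 0x1F80 := (show abiInv _ from hat.abi).2
  have hsse := ProgX.Base.sseOK_of_abiInv hat.abi
  have w_kept : RegsKept [.rsp] v v := RegsKept.refl _ _
  u_walk hcode [hμ.vendor, Gif.Spec.cnt32_succ k hk32]
    until [Gif.L.digest_file.at_1059af]
    span [ProgX.Base.L.textLo, ProgX.Base.L.textHi] side (v_side)
  -- 0x1059ab → 0x1059af (gif_driver.c:158, `k++`): BACK AT THE HEAD, `Head (m − 1)`: `At` by `digest_file.At.carry`
  have hun : ShadowUntouched v.mem s_1059ab.mem := by v_untouched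
  have hsame : Mem.SameExcept [⟨(e.reg .rsp).toNat - 224, (e.reg .rsp).toNat - 64⟩] v.mem s_1059ab.mem := by
    rw [w_mem]
    u_same
  have habi : (conv u₀).inv s_1059ab := by v_inv
  have hat' := hat.carry (cut' := Gif.L.digest_file.at_1059af) w_rip w_rsp (w_kept.get .r12 rfl)
    (ProgX.Base.conv_code_in w_eq) habi hun hsame
  have h_count' : s_1059ab.mem.readLE (e.reg .rsp - 76) 4 = F.imgs.length := by
    u_frame h_count
  refine ReachVia.done ⟨m - 1, by omega, hat', h_count', ?_, ?_⟩
  · -- r13 = k + 1 ≤ ImageCount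
    rw [w_r13, toNat_ofNat_addr (k + 1) (by omega)]
    omega
  · -- the measure
    rw [w_r13, toNat_ofNat_addr (k + 1) (by omega)]
    omega

end Gif.Spec.digest_file_6
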